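-- pv_equiv track=rewrite | github.com/rgirl0801/Poetry_repo | lesson4/sum_of_positive.py | positive_sum2
-- ===== SOURCE A (Python) =====
-- def positive_sum2(arr):
--     # Filter out negative numbers
-- 		arr1 = []
-- 		for i in arr:
-- 			if i > 0:
-- 				arr1.append(i)
-- 		# Sum the list
-- 		sum = 0
-- 		for i in arr1:
-- 			sum += i
-- 		return sum
-- ===== SOURCE B (Python) =====
-- def positive_sum2(arr):
--     # Single pass: accumulate directly, no intermediate filtered list
--     total = 0
--     for i in arr:
--         if i > 0:
--             total += i
--     return total
-- ===== Notes on version B (the rewrite author's own statement) =====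
-- stated objective: simpler
-- what changed: Fuses A's two passes (build a filtered list, then sum it) into one loop that maintains only a running total and never materialises the intermediate list.
import Mathlib
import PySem

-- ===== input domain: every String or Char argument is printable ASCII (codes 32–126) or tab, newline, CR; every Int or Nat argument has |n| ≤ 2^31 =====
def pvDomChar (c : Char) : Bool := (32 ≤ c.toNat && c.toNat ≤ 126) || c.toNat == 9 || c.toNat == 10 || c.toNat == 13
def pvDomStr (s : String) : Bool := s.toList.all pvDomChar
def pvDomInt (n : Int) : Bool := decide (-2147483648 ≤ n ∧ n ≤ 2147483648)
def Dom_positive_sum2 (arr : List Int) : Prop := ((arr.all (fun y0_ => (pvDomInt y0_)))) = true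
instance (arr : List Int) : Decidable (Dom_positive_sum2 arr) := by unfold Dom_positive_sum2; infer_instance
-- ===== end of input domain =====

-- ===== PORT A =====
-- Port B fuses the passes; header: B replaces A's filter-then-sum two-pass with a single accumulating loop (simpler).
def positive_sum2 (arr : List Int) : Int :=
  let arr1 := arr.foldl (fun acc i => if i > 0 then acc ++ [i] else acc) []
  arr1.foldl (fun s i => s + i) 0

-- ===== PORT B =====
def positive_sum2_alt (arr : List Int) : Int :=
  arr.foldl (fun total i => if i > 0 then total + i else total) 0

-- ===== PRECONDITION & SPEC =====
def Spec_positive_sum2 (arr : List Int) (out : Int) : Prop := out = positive_sum2_alt arr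
instance (arr : List Int) (out : Int) : Decidable (Spec_positive_sum2 arr out) := by unfold Spec_positive_sum2; infer_instance

-- ===== CLAIM (what is proved, stated in full; the proofs are below) =====
def Claim_equal_positive_sum2 : Prop := ∀ (arr : List Int), Dom_positive_sum2 arr → Spec_positive_sum2 arr (positive_sum2 arr)

-- ===== LEMMAS AND PROOFS =====

-- invariant: summing the filtered accumulator equals carrying the sum directly
lemma fused_eq (arr : List Int) (acc : List Int) :
    (arr.foldl (fun acc i => if i > 0 then acc ++ [i] else acc) acc).foldl (fun s i => s + i) 0
      = arr.foldl (fun total i => if i > 0 then total + i else total)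
          (acc.foldl (fun s i => s + i) 0) := by
  induction arr generalizing acc with
  | nil => rfl
  | cons x xs ih =>
    simp only [List.foldl]
    split_ifs with h
    · rw [ih]
      congr 1
      simp [List.foldl_append]
    · rw [ih]

-- ===== VERDICT (by name: the statement is the Claim_ definition above) =====
theorem positive_sum2_spec : Claim_equal_positive_sum2 := by
  intro arr _
  unfold Spec_positive_sum2 positive_sum2 positive_sum2_alt
  simpa using fused_eq arr []
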